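-- pv_equiv track=rewrite | github.com/julianazacharias/code-signal-courses | fundamental-interview-preparation-with-python/04-advanced-loops/03-navigating-arrays.py | solution
-- ===== SOURCE A (Python) =====
-- def solution(numbers):
--     n = len(numbers)
--     result = []
--
--     for i in range(n):
--         if numbers[i] < 0: # SE FOR UM OBSTACULO
--             result.append(-1)
--         else:
--             found_obstacle = False
--             ultimo_valor = min(i + numbers[i] + 1, n)
--             for j in range(i + 1, ultimo_valor):
--                 if numbers[j] < 0:
--                     result.append(j)
--                     found_obstacle = True
--                     break
--             if not found_obstacle:
--                 result.append(numbers[i])  # No obstacle found, keep original value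
--
--     return result
-- ===== SOURCE B (Python) =====
-- def solution(numbers):
--     # Backward pass: track the index of the nearest obstacle to the right.
--     n = len(numbers)
--     res = [0] * n
--     nxt = None  # index of nearest negative element to the right
--     for i in range(n - 1, -1, -1):
--         v = numbers[i]
--         if v < 0:
--             res[i] = -1
--             nxt = i
--         elif nxt is not None and nxt <= i + v:
--             res[i] = nxt
--         else:
--             res[i] = v
--     return res
-- ===== Notes on version B (the rewrite author's own statement) =====
-- stated objective: alternative
-- what changed: Replaces the per-cell forward scan for the first obstacle with a single backward pass that maintains the index of the nearest obstacle to the right, doing constant work per cell.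
import Mathlib
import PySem

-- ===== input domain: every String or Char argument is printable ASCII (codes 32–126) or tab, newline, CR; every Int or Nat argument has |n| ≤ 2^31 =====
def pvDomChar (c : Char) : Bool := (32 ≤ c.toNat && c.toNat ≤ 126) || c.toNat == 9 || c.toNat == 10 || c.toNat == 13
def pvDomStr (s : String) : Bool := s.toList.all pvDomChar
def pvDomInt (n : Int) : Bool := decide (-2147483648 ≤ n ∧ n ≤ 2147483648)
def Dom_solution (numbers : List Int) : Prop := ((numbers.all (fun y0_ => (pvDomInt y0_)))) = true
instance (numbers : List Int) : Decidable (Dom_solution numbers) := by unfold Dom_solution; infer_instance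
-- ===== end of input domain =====

-- B replaces A's per-cell forward scan by one backward pass tracking the nearest obstacle index (objective: alternative).


-- ===== PORT A =====
-- inner 'for j in range(i+1, ultimo_valor): if numbers[j] < 0: append j; break' as a scan
-- returning the first j in the range with numbers[j] < 0 (indices in range, so pyGetD is exact)
def scanA (numbers : List Int) : List Int → Option Int
  | [] => none
  | j :: js => if PySem.List.pyGetD numbers j 0 < 0 then some j else scanA numbers js

def solution (numbers : List Int) : List Int :=
  let n : Int := numbers.length
  (PySem.List.pyRange 0 n 1).foldl (fun result i =>
    let v := PySem.List.pyGetD numbers i 0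
    if v < 0 then result ++ [-1]
    else
      let ultimo := min (i + v + 1) n
      match scanA numbers (PySem.List.pyRange (i + 1) ultimo 1) with
      | some j => result ++ [j]
      | none => result ++ [v]) []

-- ===== PORT B =====
-- backward pass: goB i l processes the suffix l (starting at absolute index i), returning
-- (index of nearest obstacle in l, result list for l)
def goB : Int → List Int → Option Int × List Int
  | _, [] => (none, [])
  | i, v :: rest =>
    let p := goB (i + 1) rest
    let nxt := p.1
    let res := p.2
    if v < 0 then (some i, -1 :: res)
    else
      match nxt with
      | some j => if j ≤ i + v then (some j, j :: res) else (some j, v :: res)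
      | none => (none, v :: res)

def solution_alt (numbers : List Int) : List Int := (goB 0 numbers).2

-- ===== PRECONDITION & SPEC =====
def Spec_solution (numbers : List Int) (out : List Int) : Prop := out = solution_alt numbers
instance (numbers : List Int) (out : List Int) : Decidable (Spec_solution numbers out) := by unfold Spec_solution; infer_instance

-- ===== CLAIM (what is proved, stated in full; the proofs are below) =====
def Claim_equal_solution : Prop := ∀ (numbers : List Int), Dom_solution numbers → Spec_solution numbers (solution numbers)

-- ===== LEMMAS AND PROOFS =====

-- index of the first negative element of l, offset by i
def firstNeg : Int → List Int → Option Int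
  | _, [] => none
  | i, v :: rest => if v < 0 then some i else firstNeg (i + 1) rest

-- per-index value A computes
def fA (numbers : List Int) (i : Int) : Int :=
  let v := PySem.List.pyGetD numbers i 0
  if v < 0 then -1
  else
    match scanA numbers (PySem.List.pyRange (i + 1) (min (i + v + 1) (numbers.length : Int)) 1) with
    | some j => j
    | none => v

theorem firstNeg_bounds : ∀ (l : List Int) (i j : Int), firstNeg i l = some j → i ≤ j ∧ j < i + l.length := by
  intro l
  induction l with
  | nil => intro i j h; simp [firstNeg] at h
  | cons v rest ih =>
    intro i j h
    simp only [firstNeg] at h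
    split at h
    · cases h; simp
    · have := ih (i + 1) j h
      simp only [List.length_cons]
      push_cast at this ⊢
      omega

theorem scan_eq (numbers : List Int) (b : Int) :
    ∀ (k : Nat) (a : Nat), (b - a).toNat = k →
    scanA numbers (PySem.List.pyRange a b 1) =
      (match firstNeg a (numbers.drop a) with
       | some j => if j < b then some j else none
       | none => none) := by
  intro k
  induction k with
  | zero =>
    intro a hk
    have hba : b ≤ (a : Int) := by omega
    rw [PySem.List.pyRange_one_eq_nil hba]
    cases h : firstNeg a (numbers.drop a) with
    | none => simp [scanA]
    | some j =>
      have := firstNeg_bounds _ _ _ h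
      have : ¬ (j < b) := by omega
      simp [scanA, this]
  | succ k ih =>
    intro a hk
    have hab : (a : Int) < b := by omega
    rw [PySem.List.pyRange_one_cons hab]
    simp only [scanA]
    cases hd : numbers.drop a with
    | nil =>
      have hlen : numbers.length ≤ a := by
        by_contra hc
        have := List.length_drop (l := numbers) (i := a)
        rw [hd] at this; simp at this; omega
      have hv : PySem.List.pyGetD numbers (a : Int) 0 = 0 := by
        rw [PySem.List.pyGetD_natCast]
        exact List.getD_eq_default _ _ hlen
      have hd1 : numbers.drop (a + 1) = [] := by
        apply List.drop_eq_nil_of_le; omega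
      rw [hv]
      have : ¬ ((0:Int) < 0) := by omega
      simp only [this, if_false]
      have := ih (a + 1) (by omega)
      push_cast at this
      rw [this, hd1]
      simp [firstNeg]
    | cons v rest =>
      have hlt : a < numbers.length := by
        by_contra hc
        rw [List.drop_eq_nil_of_le (by omega)] at hd; simp at hd
      have hv : PySem.List.pyGetD numbers (a : Int) 0 = v := by
        rw [PySem.List.pyGetD_natCast, List.getD_eq_getElem _ _ hlt]
        have : numbers[a] = (numbers.drop a)[0]'(by rw [hd]; simp) := by
          simp
        rw [this]; simp [hd]
      have hd1 : numbers.drop (a + 1) = rest := by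
        have : numbers.drop (a + 1) = (numbers.drop a).drop 1 := by
          rw [List.drop_drop]
        rw [this, hd]; rfl
      rw [hv]
      by_cases hneg : v < 0
      · simp only [hneg, if_true, firstNeg, hab]
      · simp only [hneg, if_false]
        have := ih (a + 1) (by omega)
        push_cast at this
        rw [this, hd1]
        simp [firstNeg, hneg]

theorem goB_eq (numbers : List Int) :
    ∀ (l : List Int) (i : Nat), numbers.drop i = l →
    goB i l = (firstNeg i l, (PySem.List.pyRange i numbers.length 1).map (fA numbers)) := by
  intro l
  induction l with
  | nil =>
    intro i hd
    have hlen : numbers.length ≤ i := by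
      by_contra hc
      have := List.length_drop (l := numbers) (i := i)
      rw [hd] at this; simp at this; omega
    rw [PySem.List.pyRange_one_eq_nil (by exact_mod_cast hlen)]
    simp [goB, firstNeg]
  | cons v rest ih =>
    intro i hd
    have hlt : i < numbers.length := by
      by_contra hc
      rw [List.drop_eq_nil_of_le (by omega)] at hd; simp at hd
    have hd1 : numbers.drop (i + 1) = rest := by
      have : numbers.drop (i + 1) = (numbers.drop i).drop 1 := by rw [List.drop_drop]
      rw [this, hd]; rfl
    have hv : PySem.List.pyGetD numbers (i : Int) 0 = v := by
      rw [PySem.List.pyGetD_natCast, List.getD_eq_getElem _ _ hlt]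
      have : numbers[i] = (numbers.drop i)[0]'(by rw [hd]; simp) := by simp
      rw [this]; simp [hd]
    have hrange : PySem.List.pyRange (i : Int) numbers.length 1
        = (i : Int) :: PySem.List.pyRange ((i : Int) + 1) numbers.length 1 :=
      PySem.List.pyRange_one_cons (by exact_mod_cast hlt)
    have ihh := ih (i + 1) hd1
    push_cast at ihh
    rw [hrange]
    simp only [goB, ihh, List.map_cons]
    have hrest : rest.length = numbers.length - (i + 1) := by
      have := List.length_drop (l := numbers) (i := i + 1)
      rw [hd1] at this; omega
    by_cases hneg : v < 0
    · simp only [hneg, if_true, firstNeg, fA, hv]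
    · have hscan := scan_eq numbers (min ((i : Int) + v + 1) (numbers.length : Int))
        (((min ((i : Int) + v + 1) (numbers.length : Int)) - ((i : Nat) + 1 : Nat)).toNat) (i + 1) rfl
      push_cast at hscan
      rw [hd1] at hscan
      simp only [hneg, if_false, firstNeg, fA, hv]
      cases hfn : firstNeg ((i : Int) + 1) rest with
      | none => rw [hfn] at hscan; simp only [hscan]
      | some j =>
        rw [hfn] at hscan
        have hb := firstNeg_bounds _ _ _ hfn
        rw [hrest] at hb
        have hjlen : j < (numbers.length : Int) := by omega
        by_cases hj : j ≤ (i : Int) + v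
        · have : j < min ((i : Int) + v + 1) (numbers.length : Int) := by omega
          simp only [this, if_true] at hscan
          simp only [hscan, hj, if_true]
        · have : ¬ (j < min ((i : Int) + v + 1) (numbers.length : Int)) := by omega
          simp only [this, if_false] at hscan
          simp only [hscan, hj, if_false]

theorem foldA (numbers : List Int) :
    ∀ (js : List Int) (init : List Int),
    js.foldl (fun result i =>
      let v := PySem.List.pyGetD numbers i 0
      if v < 0 then result ++ [-1]
      else
        let ultimo := min (i + v + 1) (numbers.length : Int)
        match scanA numbers (PySem.List.pyRange (i + 1) ultimo 1) with
        | some j => result ++ [j]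
        | none => result ++ [v]) init = init ++ js.map (fA numbers) := by
  intro js
  induction js with
  | nil => intro init; simp
  | cons i rest ih =>
    intro init
    rw [List.foldl_cons, ih, List.map_cons]
    have : (let v := PySem.List.pyGetD numbers i 0
      if v < 0 then init ++ [-1]
      else
        let ultimo := min (i + v + 1) (numbers.length : Int)
        match scanA numbers (PySem.List.pyRange (i + 1) ultimo 1) with
        | some j => init ++ [j]
        | none => init ++ [v]) = init ++ [fA numbers i] := by
      simp only [fA]
      split
      · rfl
      · split <;> rfl
    rw [this]
    simp

-- ===== VERDICT (by name: the statement is the Claim_ definition above) =====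
theorem solution_spec : Claim_equal_solution := by
  intro numbers _
  unfold Spec_solution solution solution_alt
  have hmap := foldA numbers (PySem.List.pyRange 0 (numbers.length : Int) 1) []
  simp only [hmap, List.nil_append]
  have hgo := goB_eq numbers numbers 0 (by simp)
  push_cast at hgo
  rw [hgo]
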